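-- pv_equiv track=rewrite | github.com/abhipad14/Data_Structures_-_Algorithms | Top Coder/BearPasswordAny.py | check
-- ===== SOURCE A (Python) =====
-- def check(password, l, x):
--     for i in range(len(x)):
--         subl = i + 1
--         count = 0
--         for j in range(len(password) - i):
--             substr = password[j:j + subl]
--             if len(set(substr)) == 1:
--                 count += 1
--         if count != x[i]:
--             return 0
--     return 1
-- ===== SOURCE B (Python) =====
-- def check(password, l, x):
--     for i, xi in enumerate(x):
--         need = i + 1
--         cnt = 0
--         run = 0
--         prev = None
--         for c in password:
--             run = run + 1 if c == prev else 1
--             prev = c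
--             if run >= need:
--                 cnt += 1
--         if cnt != xi:
--             return 0
--     return 1
-- ===== Notes on version B (the rewrite author's own statement) =====
-- stated objective: faster
-- what changed: Per length L, instead of slicing every window and building a set of its characters, B makes one linear scan tracking the current equal-character run length and counts positions where the run reaches L.
import Mathlib
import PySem

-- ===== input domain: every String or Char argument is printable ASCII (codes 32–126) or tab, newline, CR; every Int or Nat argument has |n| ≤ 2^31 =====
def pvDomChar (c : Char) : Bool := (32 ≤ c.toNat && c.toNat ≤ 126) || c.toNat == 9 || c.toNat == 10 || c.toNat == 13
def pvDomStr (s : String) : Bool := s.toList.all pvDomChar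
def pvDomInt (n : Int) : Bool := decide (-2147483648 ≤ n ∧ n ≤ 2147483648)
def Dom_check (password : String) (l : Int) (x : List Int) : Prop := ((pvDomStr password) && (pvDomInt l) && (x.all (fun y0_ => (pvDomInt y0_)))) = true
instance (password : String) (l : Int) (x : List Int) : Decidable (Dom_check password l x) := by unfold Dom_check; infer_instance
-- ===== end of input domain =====

-- B replaces A's per-window slice+set test with one linear run-length scan per length (objective: faster).


-- ===== PORT A =====
-- inner loop: for j in range(len(password) - i): if len(set(password[j:j+subl])) == 1: count += 1
def checkInner (s : List Char) (i : Nat) : Int :=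
  (List.range (s.length - i)).foldl
    (fun (count : Int) (j : Nat) =>
      if (PySem.Set.ofList (PySem.List.slice s (some (j : Int)) (some ((j : Int) + ((i : Int) + 1))))).length = 1
      then count + 1 else count) 0

-- outer loop over x with index i; early 'return 0' on mismatch
def checkLoopA (s : List Char) : List Int → Nat → Int
  | [], _ => 1
  | xi :: rest, i => if checkInner s i ≠ xi then 0 else checkLoopA s rest (i + 1)

def check (password : String) (l : Int) (x : List Int) : Int :=
  checkLoopA password.toList x 0

-- ===== PORT B =====
-- one step of B's scan: state (cnt, run, prev); run = run + 1 if c == prev else 1; if run >= need: cnt += 1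
def altStep (need : Nat) (st : Int × Nat × Option Char) (c : Char) : Int × Nat × Option Char :=
  let run := if st.2.2 = some c then st.2.1 + 1 else 1
  ((if need ≤ run then st.1 + 1 else st.1), run, some c)

-- single linear scan counting positions where the current equal-char run is at least `need`
def altInner (s : List Char) (need : Nat) : Int :=
  (s.foldl (altStep need) ((0 : Int), (0 : Nat), (none : Option Char))).1

def checkLoopB (s : List Char) : List Int → Nat → Int
  | [], _ => 1
  | xi :: rest, i => if altInner s (i + 1) ≠ xi then 0 else checkLoopB s rest (i + 1)

def check_alt (password : String) (l : Int) (x : List Int) : Int :=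
  checkLoopB password.toList x 0

-- ===== PRECONDITION & SPEC =====
def Spec_check (password : String) (l : Int) (x : List Int) (out : Int) : Prop := out = check_alt password l x
instance (password : String) (l : Int) (x : List Int) (out : Int) : Decidable (Spec_check password l x out) := by unfold Spec_check; infer_instance

-- ===== CLAIM (what is proved, stated in full; the proofs are below) =====
def Claim_equal_check : Prop := ∀ (password : String) (l : Int) (x : List Int), Dom_check password l x → Spec_check password l x (check password l x)

-- ===== LEMMAS AND PROOFS =====
-- run of equal characters at the FRONT of a list
def runFrom : List Char → Nat
  | [] => 0
  | [_] => 1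
  | a :: b :: t => if a = b then runFrom (b :: t) + 1 else 1

-- length of the maximal equal-character run at the END of s
def lastRun (s : List Char) : Nat := runFrom s.reverse

-- all characters of t are pairwise equal
def allE (t : List Char) : Prop := ∀ a ∈ t, ∀ b ∈ t, a = b

theorem runFrom_cons (a : Char) (t : List Char) :
    runFrom (a :: t) = if t.head? = some a then runFrom t + 1 else 1 := by
  cases t with
  | nil => simp [runFrom]
  | cons b t' =>
    simp only [runFrom, List.head?_cons, Option.some.injEq]
    by_cases h : a = b <;> simp [h, eq_comm]

theorem runFrom_le (t : List Char) : runFrom t ≤ t.length := by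
  induction t with
  | nil => simp [runFrom]
  | cons a t ih =>
    rw [runFrom_cons]
    split <;> simp <;> omega

theorem lastRun_le (s : List Char) : lastRun s ≤ s.length := by
  simpa [lastRun] using runFrom_le s.reverse

theorem lastRun_concat (t : List Char) (c : Char) :
    lastRun (t ++ [c]) = if t.getLast? = some c then lastRun t + 1 else 1 := by
  simp [lastRun, List.reverse_append, runFrom_cons, List.head?_reverse]

theorem setLen1 (t : List Char) :
    (PySem.Set.ofList t).length = 1 ↔ t ≠ [] ∧ allE t := by
  constructor
  · intro h
    obtain ⟨a, ha⟩ := List.length_eq_one_iff.mp h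
    cases t with
    | nil => simp [PySem.Set.ofList] at h
    | cons x t' =>
      refine ⟨by simp, ?_⟩
      intro p hp q hq
      have hp' : p ∈ PySem.Set.ofList (x :: t') := (PySem.Set.mem_ofList _ _).mpr hp
      have hq' : q ∈ PySem.Set.ofList (x :: t') := (PySem.Set.mem_ofList _ _).mpr hq
      rw [ha] at hp' hq'
      simp at hp' hq'
      rw [hp', hq']
  · rintro ⟨hne, hall⟩
    cases t with
    | nil => exact absurd rfl hne
    | cons x t' =>
      have hx : x ∈ PySem.Set.ofList (x :: t') := (PySem.Set.mem_ofList _ _).mpr (by simp)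
      have hmem : ∀ b ∈ PySem.Set.ofList (x :: t'), b = x := by
        intro b hb
        exact hall b ((PySem.Set.mem_ofList _ _).mp hb) x (by simp)
      have hrep := List.eq_replicate_of_mem hmem
      have hnd : (PySem.Set.ofList (x :: t')).Nodup := PySem.Set.nodup_ofList _
      rw [hrep] at hnd hx
      have hle : (PySem.Set.ofList (x :: t')).length ≤ 1 := (List.nodup_replicate).mp hnd
      have hge : 1 ≤ (PySem.Set.ofList (x :: t')).length := by
        by_contra h
        have h0 : (PySem.Set.ofList (x :: t')).length = 0 := by omega
        rw [h0] at hx; simp at hx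
      omega

theorem allE_concat_mem (u : List Char) (c : Char) (h : c ∈ u) :
    allE (u ++ [c]) ↔ allE u := by
  constructor
  · intro ha p hp q hq
    exact ha p (by simp [hp]) q (by simp [hq])
  · intro ha p hp q hq
    rcases List.mem_append.mp hp with hp | hp
    · rcases List.mem_append.mp hq with hq | hq
      · exact ha p hp q hq
      · simp at hq; rw [hq]; exact ha p hp c h
    · simp at hp
      rcases List.mem_append.mp hq with hq | hq
      · rw [hp]; exact ha c h q hq
      · simp at hq; rw [hp, hq]
-- the last-L-characters window is all-equal iff the trailing run reaches L
theorem window (s : List Char) (L : Nat) (h1 : 1 ≤ L) (h2 : L ≤ s.length) :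
    allE (s.drop (s.length - L)) ↔ L ≤ lastRun s := by
  induction s using List.reverseRecOn generalizing L with
  | nil => simp at h2; omega
  | append_singleton t c ih =>
    rw [lastRun_concat]
    have hn : (t ++ [c]).length = t.length + 1 := by simp
    rcases Nat.eq_or_lt_of_le h1 with hL1 | hL2
    · -- L = 1
      subst hL1
      have hwin : (t ++ [c]).drop ((t ++ [c]).length - 1) = [c] := by
        rw [hn, Nat.add_sub_cancel, List.drop_append_of_le_length (by omega)]
        simp
      rw [hwin]
      constructor
      · intro _; split <;> omega
      · intro _ p hp q hq; simp at hp hq; rw [hp, hq]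
    · -- 2 ≤ L
      have hLt : L - 1 ≤ t.length := by rw [hn] at h2; omega
      have hk : (t ++ [c]).length - L = t.length - (L - 1) := by rw [hn]; omega
      rw [hk, List.drop_append_of_le_length (by omega)]
      set u := t.drop (t.length - (L - 1)) with hu
      have hulen : u.length = L - 1 := by rw [hu]; simp; omega
      have hune : u ≠ [] := by
        intro h; rw [h] at hulen; simp at hulen; omega
      have hlast : t.getLast? = u.getLast? := by
        conv_lhs => rw [← List.take_append_drop (t.length - (L - 1)) t]
        exact List.getLast?_append_of_ne_nil _ hune
      by_cases hc : t.getLast? = some c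
      · have hcu : c ∈ u := List.mem_of_getLast? (hlast ▸ hc)
        rw [if_pos hc, allE_concat_mem u c hcu, hu, ih (L - 1) (by omega) hLt]
        omega
      · rw [if_neg hc]
        constructor
        · intro ha
          have hune' : u.getLast? ≠ none := fun h => hune (List.getLast?_eq_none_iff.mp h)
          obtain ⟨d, hd⟩ := Option.ne_none_iff_exists'.mp hune'
          have hdu : d ∈ u := List.mem_of_getLast? hd
          have hdc : d = c := ha d (by simp [hdu]) c (by simp)
          rw [hdc] at hd
          exact absurd (hlast.trans hd) hc
        · intro h; exact absurd h (by omega)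

-- B's scan, characterized: starting from the state reached after t, folding u counts
-- the positions k of u whose trailing run in t ++ u.take (k+1) reaches `need`
theorem foldB (need : Nat) (u : List Char) : ∀ (t : List Char) (cnt : Int),
    u.foldl (altStep need) (cnt, lastRun t, t.getLast?) =
      (cnt + ((List.range u.length).countP
          (fun k => decide (need ≤ lastRun (t ++ u.take (k + 1)))) : Nat),
        lastRun (t ++ u), (t ++ u).getLast?) := by
  induction u with
  | nil => intro t cnt; simp
  | cons c u' ih =>
    intro t cnt
    have hstep : altStep need (cnt, lastRun t, t.getLast?) c =
        ((if need ≤ lastRun (t ++ [c]) then cnt + 1 else cnt), lastRun (t ++ [c]), some c) := by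
      simp only [altStep, lastRun_concat]
    have hgl : some c = (t ++ [c]).getLast? := (List.getLast?_concat).symm
    rw [List.foldl_cons, hstep, hgl, ih (t ++ [c])]
    simp only [Prod.mk.injEq]
    refine ⟨?_, by rw [← List.append_cons], by rw [← List.append_cons]⟩
    have hcount : ((List.range (c :: u').length).countP
          (fun k => decide (need ≤ lastRun (t ++ (c :: u').take (k + 1)))) : Nat) =
        (if need ≤ lastRun (t ++ [c]) then 1 else 0) +
        ((List.range u'.length).countP
          (fun k => decide (need ≤ lastRun (t ++ [c] ++ u'.take (k + 1)))) : Nat) := by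
      rw [List.length_cons, List.range_succ_eq_map, List.countP_cons, List.countP_map]
      simp only [Function.comp_def, List.take_succ_cons, List.take_zero, decide_eq_true_eq]
      simp only [← List.append_cons]
      exact Nat.add_comm _ _
    rw [hcount]
    push_cast
    split_ifs <;> omega

theorem altInner_eq (s : List Char) (need : Nat) :
    altInner s need =
      (((List.range s.length).countP (fun k => decide (need ≤ lastRun (s.take (k + 1))))) : Int) := by
  have h0 : (((0 : Int), (0 : Nat), (none : Option Char)))
      = ((0 : Int), lastRun [], ([] : List Char).getLast?) := rfl
  rw [altInner, h0, foldB]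
  simp only [List.nil_append, Int.zero_add]
  rfl

theorem checkInner_eq (s : List Char) (i : Nat) :
    checkInner s i =
      (((List.range (s.length - i)).countP
        (fun j => decide (i + 1 ≤ lastRun (s.take (j + (i + 1)))))) : Int) := by
  rw [checkInner, PySem.List.foldl_ite_add_one]
  rw [Int.zero_add]
  congr 1
  apply List.countP_congr
  intro j hj
  have hjlt : j < s.length - i := List.mem_range.mp hj
  have hcast : ((j : Int) + ((i : Int) + 1)) = ((j : Int) + ((i + 1 : Nat) : Int)) := by push_cast; ring
  rw [hcast, PySem.List.slice_natCast_add]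
  have hwin : (s.drop j).take (i + 1) = (s.take (j + (i + 1))).drop j := by
    rw [List.drop_take]
    congr 1
    omega
  have hlen : (s.take (j + (i + 1))).length = j + (i + 1) := by
    simp; omega
  have hne : (s.take (j + (i + 1))).drop j ≠ [] := by
    intro h
    have := congrArg List.length h
    simp [hlen] at this
  have hW := window (s.take (j + (i + 1))) (i + 1) (by omega) (by omega)
  rw [hlen] at hW
  have hj' : j + (i + 1) - (i + 1) = j := by omega
  rw [hj'] at hW
  rw [hwin]
  simp only [decide_eq_true_eq, setLen1]
  constructor
  · rintro ⟨_, h⟩; exact hW.mp h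
  · intro h; exact ⟨hne, hW.mpr h⟩

theorem shift (s : List Char) (i : Nat) :
    (List.range (s.length - i)).countP
        (fun j => decide (i + 1 ≤ lastRun (s.take (j + (i + 1))))) =
      (List.range s.length).countP (fun k => decide (i + 1 ≤ lastRun (s.take (k + 1)))) := by
  have hsmall : ∀ k, k < i → (decide (i + 1 ≤ lastRun (s.take (k + 1)))) = false := by
    intro k hk
    have h1 := lastRun_le (s.take (k + 1))
    have h2 : (s.take (k + 1)).length ≤ k + 1 := by simp
    simp only [decide_eq_false_iff_not]
    omega
  by_cases h : s.length ≤ i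
  · have hz : s.length - i = 0 := by omega
    rw [hz]
    simp only [List.range_zero, List.countP_nil]
    symm
    apply List.countP_eq_zero.mpr
    intro k hk
    have hk' : k < s.length := List.mem_range.mp hk
    have h1 := lastRun_le (s.take (k + 1))
    have h2 : (s.take (k + 1)).length ≤ k + 1 := by simp
    simp only [decide_eq_true_eq]
    omega
  · have hn : s.length = i + (s.length - i) := by omega
    conv_rhs => rw [hn, List.range_add]
    rw [List.countP_append, List.countP_map]
    have hz : (List.range i).countP (fun k => decide (i + 1 ≤ lastRun (s.take (k + 1)))) = 0 := by
      apply List.countP_eq_zero.mpr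
      intro k hk
      rw [hsmall k (List.mem_range.mp hk)]
      simp
    rw [hz, Nat.zero_add]
    apply List.countP_congr
    intro j _
    simp only [Function.comp_def]
    have hje : i + j + 1 = j + (i + 1) := by omega
    rw [hje]

theorem inner_eq (s : List Char) (i : Nat) : checkInner s i = altInner s (i + 1) := by
  rw [checkInner_eq, altInner_eq, shift]

theorem loop_eq (s : List Char) (xs : List Int) : ∀ i, checkLoopA s xs i = checkLoopB s xs i := by
  induction xs with
  | nil => intro i; rfl
  | cons xi rest ih =>
    intro i
    simp only [checkLoopA, checkLoopB, inner_eq, ih]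

-- ===== VERDICT (by name: the statement is the Claim_ definition above) =====
theorem check_spec : Claim_equal_check := by
  intro password l x _
  unfold Spec_check check check_alt
  exact loop_eq password.toList x 0
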